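-- pv_equiv track=rewrite | github.com/lfowles/advent-of-code | python/2017/day6.py | find_specific_redistribution_cycle
-- ===== SOURCE A (Python) =====
-- def redistribute(banks):
--     # find largest
--     largest_index = banks.index(max(banks))
--     value = banks[largest_index]
--     banks[largest_index] = 0
--     i = largest_index
--     while value > 0:
--         i += 1
--         banks[i % len(banks)] += 1
--         value -= 1
--
-- def find_specific_redistribution_cycle(banks):
--     banks = list(banks)
--     seen_banks = dict()
--     cycles = 0
--
--     while tuple(banks) not in seen_banks:
--         seen_banks[tuple(banks)] = cycles
--         cycles += 1
--         redistribute(banks)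
--
--     return cycles - seen_banks[tuple(banks)]
-- ===== SOURCE B (Python) =====
-- def find_specific_redistribution_cycle(banks):
--     banks = list(banks)
--     seen = {}
--     cycles = 0
--     n = len(banks)
--     while tuple(banks) not in seen:
--         seen[tuple(banks)] = cycles
--         cycles += 1
--         m = max(banks)
--         i = banks.index(m)
--         banks[i] = 0
--         if m > 0:
--             q, r = divmod(m, n)
--             banks = [x + q + (1 if (p - i - 1) % n < r else 0)
--                      for p, x in enumerate(banks)]
--     return cycles - seen[tuple(banks)]
-- ===== Notes on version B (the rewrite author's own statement) =====
-- stated objective: alternative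
-- what changed: Redistribution is computed in closed form: each bank receives m // n tokens plus one extra iff (p - i - 1) % n < m % n, replacing A's inner loop that hands out the m tokens one at a time.
import Mathlib
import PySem

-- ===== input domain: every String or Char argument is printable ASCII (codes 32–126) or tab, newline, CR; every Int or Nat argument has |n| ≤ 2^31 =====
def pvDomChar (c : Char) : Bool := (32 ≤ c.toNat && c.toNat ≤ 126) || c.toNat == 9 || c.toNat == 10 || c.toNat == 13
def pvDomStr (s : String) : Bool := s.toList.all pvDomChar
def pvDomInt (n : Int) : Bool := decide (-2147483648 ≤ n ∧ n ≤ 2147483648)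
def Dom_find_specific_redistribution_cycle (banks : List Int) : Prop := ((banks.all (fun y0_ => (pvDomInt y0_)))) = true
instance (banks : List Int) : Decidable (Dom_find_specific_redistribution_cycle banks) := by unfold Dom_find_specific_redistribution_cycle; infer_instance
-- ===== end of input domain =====

-- B replaces A's one-token-at-a-time redistribution loop by a closed-form per-bank
-- share (division/modulo), computed in one pass (alternative algorithm, same measured cost).


-- ===== PORT A =====
-- the inner 'while value > 0' loop of redistribute: one token per iteration
def pvRedistLoopA (banks : List Int) (i value : Int) : List Int :=
  if h : value > 0 then
    pvRedistLoopA
      (PySem.List.pySetD banks (PySem.Int.mod (i + 1) (banks.length : Int))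
        (PySem.List.pyGetD banks (PySem.Int.mod (i + 1) (banks.length : Int)) 0 + 1))
      (i + 1) (value - 1)
  else banks
termination_by value.toNat
decreasing_by omega

-- redistribute(banks) (returns the new list; the Python mutates its local list)
def pvRedistributeA (banks : List Int) : List Int :=
  match PySem.List.max? banks (fun x => x) with
  | none => banks            -- max([]) raises ValueError: outside Pre_
  | some m =>
    match PySem.List.index? banks m with
    | none => banks          -- unreachable: m ∈ banks
    | some li =>
      let value := PySem.List.pyGetD banks (li : Int) 0
      let banks := PySem.List.pySetD banks (li : Int) 0
      pvRedistLoopA banks (li : Int) value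

-- the outer 'while tuple(banks) not in seen_banks' loop (fuel-bounded to make it total;
-- the fuel is far beyond any terminating run reached under Pre_)
def pvCycleLoopA (fuel : Nat) (banks : List Int) (seen : PySem.Dict (List Int) Int) (cycles : Int) : Int :=
  match fuel with
  | 0 => 0
  | f + 1 =>
    match seen.get? banks with
    | some v => cycles - v
    | none => pvCycleLoopA f (pvRedistributeA banks) (seen.insert banks cycles) (cycles + 1)

def find_specific_redistribution_cycle (banks : List Int) : Int :=
  pvCycleLoopA (2 ^ 64) banks PySem.Dict.empty 0

-- ===== PORT B =====
-- redistribution in closed form: bank p receives q = m // n plus one extra token iff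
-- (p - i - 1) % n < m % n  (the comprehension in Source B)
def pvRedistributeB (banks : List Int) : List Int :=
  match PySem.List.max? banks (fun x => x) with
  | none => banks            -- max([]) raises ValueError: outside Pre_
  | some m =>
    match PySem.List.index? banks m with
    | none => banks          -- unreachable: m ∈ banks
    | some li =>
      let n : Int := banks.length
      let banks := PySem.List.pySetD banks (li : Int) 0
      if m > 0 then
        let q := PySem.Int.floordiv m n
        let r := PySem.Int.mod m n
        (PySem.List.enumerate banks 0).map
          (fun pz => pz.2 + q + (if PySem.Int.mod (pz.1 - (li : Int) - 1) n < r then 1 else 0))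
      else banks

def pvCycleLoopB (fuel : Nat) (banks : List Int) (seen : PySem.Dict (List Int) Int) (cycles : Int) : Int :=
  match fuel with
  | 0 => 0
  | f + 1 =>
    match seen.get? banks with
    | some v => cycles - v
    | none => pvCycleLoopB f (pvRedistributeB banks) (seen.insert banks cycles) (cycles + 1)

def find_specific_redistribution_cycle_alt (banks : List Int) : Int :=
  pvCycleLoopB (2 ^ 64) banks PySem.Dict.empty 0

-- ===== PRECONDITION & SPEC =====
-- Pre_ excludes only the empty list, on which A raises ValueError (max of an empty sequence).
def Pre_find_specific_redistribution_cycle (banks : List Int) : Prop := banks ≠ []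
instance (banks : List Int) : Decidable (Pre_find_specific_redistribution_cycle banks) := by unfold Pre_find_specific_redistribution_cycle; infer_instance
def pvWitness_find_specific_redistribution_cycle : List Int := [0, 2, 7, 0]

def Spec_find_specific_redistribution_cycle (banks : List Int) (out : Int) : Prop := out = find_specific_redistribution_cycle_alt banks
instance (banks : List Int) (out : Int) : Decidable (Spec_find_specific_redistribution_cycle banks out) := by unfold Spec_find_specific_redistribution_cycle; infer_instance

-- ===== CLAIM (what is proved, stated in full; the proofs are below) =====
def Claim_equal_find_specific_redistribution_cycle : Prop := ∀ (banks : List Int), Dom_find_specific_redistribution_cycle banks → Pre_find_specific_redistribution_cycle banks → Spec_find_specific_redistribution_cycle banks (find_specific_redistribution_cycle banks)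

-- ===== LEMMAS AND PROOFS =====

-- the closed-form token count: after distributing v tokens starting after index i,
-- position p has gained  v / n + (1 if (p - i - 1) % n < v % n else 0)
def pvCnt (n : Int) (i v : Int) (p : Nat) : Int :=
  v / n + (if ((p : Int) - i - 1) % n < v % n then 1 else 0)

-- (d - 1) % n in terms of d % n
lemma pvModPred (n d : Int) (hn : 0 < n) :
    (d - 1) % n = if d % n = 0 then n - 1 else d % n - 1 := by
  have hd : d - 1 = (d % n - 1) + n * (d / n) := by
    have := Int.emod_add_mul_ediv d n; linarith
  have h0 : 0 ≤ d % n := Int.emod_nonneg d (by omega)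
  have h1 : d % n < n := Int.emod_lt_of_pos d hn
  rw [hd, Int.add_mul_emod_self_left]
  split_ifs with h
  · rw [h]; show (0 - 1) % n = n - 1
    have : (0 - 1 : Int) = (n - 1) + n * (-1) := by ring
    rw [this, Int.add_mul_emod_self_left, Int.emod_eq_of_lt (by omega) (by omega)]
  · exact Int.emod_eq_of_lt (by omega) (by omega)

-- (v + 1) % n and (v + 1) / n in terms of v % n, v / n
lemma pvModSucc (n v : Int) (hn : 0 < n) :
    (v + 1) % n = (if v % n = n - 1 then 0 else v % n + 1) ∧
    (v + 1) / n = (if v % n = n - 1 then v / n + 1 else v / n) := by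
  have hd : v + 1 = (v % n + 1) + n * (v / n) := by
    have := Int.emod_add_mul_ediv v n; linarith
  have h0 : 0 ≤ v % n := Int.emod_nonneg v (by omega)
  have h1 : v % n < n := Int.emod_lt_of_pos v hn
  constructor
  · rw [hd, Int.add_mul_emod_self_left]
    split_ifs with h
    · rw [h]; show (n - 1 + 1) % n = 0; simp [show n - 1 + 1 = n by ring]
    · exact Int.emod_eq_of_lt (by omega) (by omega)
  · rw [hd, Int.add_mul_ediv_left _ _ (by omega : n ≠ 0)]
    split_ifs with h
    · rw [h, show n - 1 + 1 = n by ring, Int.ediv_self (by omega)]; ring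
    · rw [Int.ediv_eq_zero_of_lt (by omega) (by omega)]; ring

-- the recurrence the closed form satisfies (one token placed at d % n = 0)
lemma pvCntRec (n i : Int) (v : Nat) (p : Nat) (hn : 0 < n) :
    pvCnt n i (v + 1) p =
      pvCnt n (i + 1) v p + (if ((p : Int) - i - 1) % n = 0 then 1 else 0) := by
  unfold pvCnt
  have hv : (0:Int) ≤ (v:Int) := by positivity
  obtain ⟨hm, hdv⟩ := pvModSucc n (v:Int) hn
  have hp : ((p:Int) - (i+1) - 1) = ((p:Int) - i - 1) - 1 := by ring
  rw [hp, pvModPred n ((p:Int) - i - 1) hn]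
  rw [hm, hdv]
  have h0 : 0 ≤ (v:Int) % n := Int.emod_nonneg _ (by omega)
  have h1 : (v:Int) % n < n := Int.emod_lt_of_pos _ hn
  have h2 : 0 ≤ ((p:Int) - i - 1) % n := Int.emod_nonneg _ (by omega)
  have h3 : ((p:Int) - i - 1) % n < n := Int.emod_lt_of_pos _ hn
  set a := (v:Int) % n
  set b := ((p:Int) - i - 1) % n
  set q := (v:Int) / n
  split_ifs <;> omega

-- enumerate+map as mapIdx
lemma pvEnumMap (xs : List Int) (s : Int) (g : Int → Int) :
    (PySem.List.enumerate xs s).map (fun pz => pz.2 + g pz.1)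
      = xs.mapIdx (fun k x => x + g (s + (k : Int))) := by
  induction xs generalizing s g with
  | nil => simp [PySem.List.enumerate_nil]
  | cons x xs ih =>
    rw [PySem.List.enumerate_cons, List.map_cons, List.mapIdx_cons, ih (s+1)]
    congr 1
    · simp
    · have he : (fun (k : Nat) (x : Int) => x + g (s + 1 + (k : Int))) = (fun (i : Nat) (x : Int) => x + g (s + ((i + 1 : Nat) : Int))) := by
        funext k y; congr 1; congr 1; push_cast; ring
      rw [he]

-- characterization of A's token loop
lemma pvLoopA_char (v : Nat) (banks : List Int) (i : Int) (hn : 0 < banks.length) :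
    pvRedistLoopA banks i (v : Int)
      = banks.mapIdx (fun p x => x + pvCnt (banks.length : Int) i (v : Int) p) := by
  induction v generalizing banks i with
  | zero =>
    rw [pvRedistLoopA]
    rw [dif_neg (by omega)]
    have h : ∀ p : Nat, pvCnt (banks.length : Int) i (0:Int) p = 0 := by
      intro p
      unfold pvCnt
      have := Int.emod_nonneg ((p:Int) - i - 1) (show (banks.length:Int) ≠ 0 by exact_mod_cast hn.ne')
      simp
      omega
    apply List.ext_getElem (by simp)
    intro p hp1 hp2
    rw [List.getElem_mapIdx]
    push_cast [h p]
    ring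
  | succ v ih =>
    have hnI : (0:Int) < (banks.length : Int) := by exact_mod_cast hn
    rw [pvRedistLoopA, dif_pos (by push_cast; omega)]
    rw [PySem.Int.mod_eq_emod_of_pos hnI]
    set e := (i + 1) % (banks.length : Int) with he
    have he0 : 0 ≤ e := Int.emod_nonneg _ (by omega)
    have he1 : e < (banks.length : Int) := Int.emod_lt_of_pos _ hnI
    rw [PySem.List.pyGetD_eq_getElem banks 0 he0 (by simpa using he1),
        PySem.List.pySetD_of_nonneg banks _ he0]
    have hlen : (banks.set e.toNat (banks[e.toNat]'(by omega) + 1)).length = banks.length := by simp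
    have hcast : ((v+1 : Nat) : Int) - 1 = (v : Int) := by push_cast; ring
    rw [hcast, ih _ (i+1) (by omega)]
    rw [hlen]
    apply List.ext_getElem (by simp)
    intro p hp1 hp2
    have hpb : p < banks.length := by simpa using hp1
    rw [List.getElem_mapIdx, List.getElem_mapIdx]
    rw [List.getElem_set]
    have hrec := pvCntRec (banks.length : Int) i v p hnI
    have hiff : (e.toNat = p) ↔ ((p:Int) - i - 1) % (banks.length : Int) = 0 := by
      have hd : ((p:Int) - i - 1) % (banks.length : Int) = ((p:Int) - e) % (banks.length : Int) := by
        conv_lhs => rw [show (p:Int) - i - 1 = (p:Int) - (i+1) by ring, Int.sub_emod]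
        rw [Int.sub_emod ((p:Int)) e, ← he, Int.emod_emod_of_dvd _ dvd_rfl]
      rw [hd]
      by_cases hpe : e ≤ (p:Int)
      · rw [Int.emod_eq_of_lt (by omega) (by push_cast at *; omega)]
        omega
      · have h1 : ((p:Int) - e) % (banks.length : Int) = ((p:Int) - e + (banks.length : Int)) % (banks.length : Int) := by
          conv_lhs => rw [show (p:Int) - e = ((p:Int) - e + (banks.length : Int)) + (banks.length : Int) * (-1) by ring]
          rw [Int.add_mul_emod_self_left]
        rw [h1, Int.emod_eq_of_lt (by omega) (by omega)]
        constructor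
        · intro h; omega
        · intro h; omega
    push_cast [hrec]
    by_cases hj : e.toNat = p
    · rw [if_pos hj, if_pos (hiff.mp hj)]
      subst hj
      ring
    · rw [if_neg hj, if_neg (fun h => hj (hiff.mpr h))]
      ring

-- the two redistributions agree on every list
lemma pvRedistribute_eq (banks : List Int) : pvRedistributeA banks = pvRedistributeB banks := by
  unfold pvRedistributeA pvRedistributeB
  cases hmax : PySem.List.max? banks (fun x => x) with
  | none => rfl
  | some m =>
    cases hidx : PySem.List.index? banks m with
    | none => dsimp only; rw [hidx]
    | some li =>
      dsimp only
      rw [hidx]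
      dsimp only
      obtain ⟨hk, hbk, -⟩ := PySem.List.getElem_of_index?_eq_some hidx
      have hn : 0 < banks.length := by omega
      have hnI : (0:Int) < (banks.length : Int) := by exact_mod_cast hn
      rw [PySem.List.pyGetD_ofNat banks li 0 hk, hbk]
      rw [PySem.List.pySetD_natCast]
      set banks' := banks.set li 0 with hb'
      have hlen' : banks'.length = banks.length := by simp [hb']
      by_cases hm : m > 0
      · rw [if_pos hm]
        have hmv : ((m.toNat : Nat) : Int) = m := Int.toNat_of_nonneg (by omega)
        have hA := pvLoopA_char m.toNat banks' li (by omega)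
        rw [hmv] at hA
        rw [hA]
        rw [PySem.Int.floordiv_eq_ediv_of_pos hnI, PySem.Int.mod_eq_emod_of_pos hnI]
        have hfn : (fun pz : Int × Int => pz.2 + m / (banks.length:Int) + (if PySem.Int.mod (pz.1 - (li : Int) - 1) (banks.length:Int) < m % (banks.length:Int) then 1 else 0))
            = (fun pz : Int × Int => pz.2 + (m / (banks.length:Int) + if (pz.1 - (li : Int) - 1) % (banks.length:Int) < m % (banks.length:Int) then 1 else 0)) := by
          funext pz
          rw [PySem.Int.mod_eq_emod_of_pos hnI]
          ring_nf
        rw [hfn, pvEnumMap banks' 0 (fun t => m / (banks.length:Int) + if (t - (li : Int) - 1) % (banks.length:Int) < m % (banks.length:Int) then 1 else 0)]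
        rw [hlen']
        apply List.ext_getElem (by simp)
        intro p hp1 hp2
        rw [List.getElem_mapIdx, List.getElem_mapIdx]
        simp [pvCnt]
      · rw [if_neg hm]
        rw [pvRedistLoopA, dif_neg hm]

lemma pvCycleLoop_eq (fuel : Nat) (banks : List Int) (seen : PySem.Dict (List Int) Int) (cycles : Int) :
    pvCycleLoopA fuel banks seen cycles = pvCycleLoopB fuel banks seen cycles := by
  induction fuel generalizing banks seen cycles with
  | zero => rfl
  | succ f ih =>
    simp only [pvCycleLoopA, pvCycleLoopB]
    cases seen.get? banks with
    | some v => rfl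
    | none => simpa [pvRedistribute_eq] using ih (pvRedistributeB banks) (seen.insert banks cycles) (cycles + 1)

-- ===== VERDICT (by name: the statement is the Claim_ definition above) =====
theorem find_specific_redistribution_cycle_spec : Claim_equal_find_specific_redistribution_cycle := by
  intro banks _ _
  unfold Spec_find_specific_redistribution_cycle find_specific_redistribution_cycle find_specific_redistribution_cycle_alt
  exact pvCycleLoop_eq _ _ _ _
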